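-- pv_equiv track=rewrite | github.com/gb1/Advent-of-Code-2022 | day9/day9_part2.py | rope_map
-- ===== SOURCE A (Python) =====
-- def rope_map(head, tails: list, size):
--     rope = []
--     line = []
--     for y in range(-size, size):
--         for x in range(-size, size):
--             if head == (x, y):
--                 line.append("H")
--             elif (x, y) in tails:
--                 line.append(str(tails.index((x, y)) + 1))
--             elif x == 0 and y == 0:
--                 line.append("S")
--             else:
--                 line += ["."]
--         rope.append(line)
--         line = []
--     rope.reverse()
--     return rope
-- ===== SOURCE B (Python) =====
-- def rope_map(head, tails, size):
--     # Paint-by-marker: blank canvas, then write S, tails back-to-front (first index wins), head last.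
--     grid = [["."] * (2 * size) for _ in range(2 * size)]
--
--     def put(p, mark):
--         x, y = p
--         if -size <= x < size and -size <= y < size:
--             grid[size - 1 - y][x + size] = mark
--
--     put((0, 0), "S")
--     for i, p in reversed(list(enumerate(tails))):
--         put(p, str(i + 1))
--     put(head, "H")
--     return grid
-- ===== Notes on version B (the rewrite author's own statement) =====
-- stated objective: alternative
-- what changed: B inverts the traversal: instead of A's per-cell scan that decides each of the 4*size^2 cells by an if/elif chain with repeated 'in tails'/'tails.index' list scans, B starts from a blank '.' canvas and scatter-writes only the markers (S first, then tails back-to-front so the lowest index wins, then H last), each write bounds-checked and placed directly at its top-down row index.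
import Mathlib
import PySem

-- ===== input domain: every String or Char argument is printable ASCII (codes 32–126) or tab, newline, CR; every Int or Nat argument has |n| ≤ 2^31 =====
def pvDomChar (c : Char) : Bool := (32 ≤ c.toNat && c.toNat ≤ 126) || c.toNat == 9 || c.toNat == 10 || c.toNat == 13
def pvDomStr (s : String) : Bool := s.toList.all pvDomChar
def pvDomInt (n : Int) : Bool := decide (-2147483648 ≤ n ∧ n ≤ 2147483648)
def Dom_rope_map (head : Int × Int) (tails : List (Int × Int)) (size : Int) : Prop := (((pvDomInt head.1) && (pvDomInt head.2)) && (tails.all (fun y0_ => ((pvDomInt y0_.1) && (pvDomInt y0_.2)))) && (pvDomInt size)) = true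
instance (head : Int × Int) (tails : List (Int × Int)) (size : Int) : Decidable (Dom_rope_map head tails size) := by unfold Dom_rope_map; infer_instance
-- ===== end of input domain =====

-- B replaces A's per-cell scan (if/elif chain with list scans for every grid cell) by a blank
-- canvas plus bounds-checked scatter writes of the markers only (S, then tails back-to-front so
-- the lowest index wins, then H last); objective: alternative algorithm, same return value.

-- ===== PORT A =====
def rope_map (head : Int × Int) (tails : List (Int × Int)) (size : Int) : List (List String) :=
  -- state (rope, line); line is reset to [] after each row, as in the Python
  ((PySem.List.pyRange (-size) size 1).foldl
    (fun (st : List (List String) × List String) y =>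
      (st.1 ++ [(PySem.List.pyRange (-size) size 1).foldl
        (fun line x =>
          if head = (x, y) then line ++ ["H"]
          else if (x, y) ∈ tails then
            -- guarded by membership, so tails.index succeeds; .getD 0 is never the default here
            line ++ [PySem.Int.toStr ((((PySem.List.index? tails (x, y)).getD 0 : Nat) : Int) + 1)]
          else if x = 0 ∧ y = 0 then line ++ ["S"]
          else line ++ ["."]) st.2],
        ([] : List String))) (([] : List (List String)), ([] : List String))).1.reverse

-- ===== PORT B =====
-- put(p, mark): bounds-checked single-cell write grid[size-1-y][x+size] = mark (row/col indices
-- are nonnegative and in range exactly when the guard holds, so .toNat and .set are exact here)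
def pvPut (size : Int) (g : List (List String)) (p : Int × Int) (m : String) : List (List String) :=
  if -size ≤ p.1 ∧ p.1 < size ∧ -size ≤ p.2 ∧ p.2 < size then
    g.set (size - 1 - p.2).toNat ((g.getD (size - 1 - p.2).toNat []).set (p.1 + size).toNat m)
  else g

def rope_map_alt (head : Int × Int) (tails : List (Int × Int)) (size : Int) : List (List String) :=
  -- blank canvas, then S, then reversed(list(enumerate(tails))), then H
  pvPut size
    (((PySem.List.enumerate tails 0).reverse).foldl
      (fun g ip => pvPut size g ip.2 (PySem.Int.toStr (ip.1 + 1)))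
      (pvPut size (List.replicate (2*size).toNat (List.replicate (2*size).toNat ".")) (0, 0) "S"))
    head "H"

-- ===== PRECONDITION & SPEC =====
def Spec_rope_map (head : Int × Int) (tails : List (Int × Int)) (size : Int) (out : List (List String)) : Prop := out = rope_map_alt head tails size
instance (head : Int × Int) (tails : List (Int × Int)) (size : Int) (out : List (List String)) : Decidable (Spec_rope_map head tails size out) := by unfold Spec_rope_map; infer_instance

-- ===== CLAIM (what is proved, stated in full; the proofs are below) =====
def Claim_equal_rope_map : Prop := ∀ (head : Int × Int) (tails : List (Int × Int)) (size : Int), Dom_rope_map head tails size → Spec_rope_map head tails size (rope_map head tails size)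

-- ===== LEMMAS AND PROOFS =====

-- the value A writes into the cell (x, y)
def cellA (head : Int × Int) (tails : List (Int × Int)) (y x : Int) : String :=
  if head = (x, y) then "H"
  else if (x, y) ∈ tails then
    PySem.Int.toStr ((((PySem.List.index? tails (x, y)).getD 0 : Nat) : Int) + 1)
  else if x = 0 ∧ y = 0 then "S"
  else "."

theorem innerA (head : Int × Int) (tails : List (Int × Int)) (y : Int)
    (l : List Int) (acc : List String) :
    l.foldl (fun line x =>
        if head = (x, y) then line ++ ["H"]
        else if (x, y) ∈ tails then
          line ++ [PySem.Int.toStr ((((PySem.List.index? tails (x, y)).getD 0 : Nat) : Int) + 1)]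
        else if x = 0 ∧ y = 0 then line ++ ["S"]
        else line ++ ["."]) acc
      = acc ++ l.map (cellA head tails y) := by
  induction l generalizing acc with
  | nil => simp
  | cons x xs ih =>
    simp only [List.foldl_cons, List.map_cons, ih, cellA]
    split_ifs <;> simp

-- a row-append loop whose line component is reset each step
theorem outer_generic (row : Int → List String) (l : List Int) (ropeAcc : List (List String)) :
    (l.foldl (fun (st : List (List String) × List String) y =>
        (st.1 ++ [st.2 ++ row y], ([] : List String))) (ropeAcc, ([] : List String))).1
      = ropeAcc ++ l.map (fun y => row y) := by
  induction l generalizing ropeAcc with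
  | nil => simp
  | cons y ys ih => simp [List.foldl_cons, ih]

-- the grid as a table of a cell function
def mg (N : Nat) (f : Nat → Nat → String) : List (List String) :=
  (List.range N).map (fun r => (List.range N).map (f r))

theorem mg_ext (N : Nat) (f g : Nat → Nat → String)
    (h : ∀ r c, r < N → c < N → f r c = g r c) : mg N f = mg N g := by
  unfold mg
  refine List.map_congr_left (fun r hr => ?_)
  refine List.map_congr_left (fun c hc => ?_)
  exact h r c (List.mem_range.mp hr) (List.mem_range.mp hc)

-- a bounds-checked write on a table grid is a pointwise if-update
theorem mg_put (size : Int) (hs : 0 ≤ size) (f : Nat → Nat → String) (p : Int × Int) (m : String) :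
    pvPut size (mg (2*size).toNat f) p m
      = mg (2*size).toNat
          (fun r c => if p.1 = (c : Int) - size ∧ p.2 = size - 1 - (r : Int) then m else f r c) := by
  unfold pvPut
  by_cases h : -size ≤ p.1 ∧ p.1 < size ∧ -size ≤ p.2 ∧ p.2 < size
  · rw [if_pos h]
    obtain ⟨h1, h2, h3, h4⟩ := h
    have hr0 : (size - 1 - p.2).toNat < (2*size).toNat := by omega
    have hc0 : (p.1 + size).toNat < (2*size).toNat := by omega
    have hget : (mg (2*size).toNat f).getD (size - 1 - p.2).toNat []
        = (List.range (2*size).toNat).map (f (size - 1 - p.2).toNat) := by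
      rw [List.getD_eq_getElem _ _ (by simpa [mg] using hr0)]
      simp [mg]
    rw [hget]
    apply List.ext_getElem
    · simp [mg]
    · intro r hrl hrr
      have hr : r < (2*size).toNat := by simpa [mg] using hrr
      rw [List.getElem_set]
      by_cases hre : (size - 1 - p.2).toNat = r
      · rw [if_pos hre]
        apply List.ext_getElem
        · simp [mg]
        · intro c hcl hcr
          have hc : c < (2*size).toNat := by simpa [mg] using hcr
          rw [List.getElem_set]
          simp only [mg, List.getElem_map, List.getElem_range]
          by_cases hce : (p.1 + size).toNat = c
          · rw [if_pos hce, if_pos (by constructor <;> omega)]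
          · rw [if_neg hce, if_neg (by rintro ⟨hx, hy⟩; omega), ← hre]
      · rw [if_neg hre]
        simp only [mg, List.getElem_map, List.getElem_range]
        refine (List.map_congr_left (fun c hcm => ?_)).symm
        have hc : c < (2*size).toNat := List.mem_range.mp hcm
        rw [if_neg (by rintro ⟨hx, hy⟩; omega)]
  · rw [if_neg h]
    refine (mg_ext _ _ _ (fun r c hr hc => ?_)).symm
    rw [if_neg (by rintro ⟨hx, hy⟩; exact h (by constructor <;> omega))]

-- the reversed-enumerate scatter loop, pointwise: first tail occurrence wins
theorem fold_tails (size : Int) (hs : 0 ≤ size) (ts : List (Int × Int)) (s : Int)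
    (f : Nat → Nat → String) :
    ((PySem.List.enumerate ts s).reverse).foldl
        (fun g ip => pvPut size g ip.2 (PySem.Int.toStr (ip.1 + 1))) (mg (2*size).toNat f)
      = mg (2*size).toNat
          (fun r c => match PySem.List.index? ts ((c : Int) - size, size - 1 - (r : Int)) with
            | some i => PySem.Int.toStr (s + (i : Int) + 1)
            | none => f r c) := by
  induction ts generalizing s f with
  | nil =>
    rw [PySem.List.enumerate_nil]
    exact mg_ext _ _ _ (fun r c _ _ => rfl)
  | cons t ts ih =>
    rw [PySem.List.enumerate_cons, List.reverse_cons, List.foldl_append, ih (s + 1)]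
    simp only [List.foldl_cons, List.foldl_nil]
    rw [mg_put size hs]
    refine mg_ext _ _ _ (fun r c hr hc => ?_)
    by_cases he : ((c : Int) - size, size - 1 - (r : Int)) = t
    · rw [← he, PySem.List.index?_cons_self]
      rw [if_pos ⟨rfl, rfl⟩]
      norm_num
    · rw [PySem.List.index?_cons_of_ne _ (fun hh => he hh.symm)]
      rw [if_neg (by rintro ⟨hx, hy⟩; exact he (by rw [← hx, ← hy]))]
      cases hidx : PySem.List.index? ts ((c : Int) - size, size - 1 - (r : Int)) with
      | none => simp
      | some i =>
        simp only [Option.map_some]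
        have : s + 1 + (i : Int) + 1 = s + ((i : Int) + 1) + 1 := by ring
        rw [this]
        push_cast
        ring_nf

-- the blank canvas is the constant table
theorem blank_eq_mg (size : Int) :
    List.replicate (2*size).toNat (List.replicate (2*size).toNat ".")
      = mg (2*size).toNat (fun _ _ => ".") := by
  simp [mg, List.map_const']

-- B's cell value equals A's cell value
theorem cell_agree (head : Int × Int) (tails : List (Int × Int)) (x y : Int) :
    (if head.1 = x ∧ head.2 = y then "H"
     else match PySem.List.index? tails (x, y) with
       | some i => PySem.Int.toStr ((0 : Int) + (i : Int) + 1)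
       | none => if (0 : Int) = x ∧ (0 : Int) = y then "S" else ".")
      = cellA head tails y x := by
  unfold cellA
  by_cases hh : head = (x, y)
  · rw [if_pos (by rw [hh]; exact ⟨rfl, rfl⟩), if_pos hh]
  · rw [if_neg (by rintro ⟨hx, hy⟩; exact hh (Prod.ext hx hy)), if_neg hh]
    cases hidx : PySem.List.index? tails (x, y) with
    | none =>
      have hnm : (x, y) ∉ tails := (PySem.List.index?_eq_none_iff _ _).mp hidx
      rw [if_neg hnm]
      by_cases h0 : x = 0 ∧ y = 0
      · rw [if_pos ⟨h0.1.symm, h0.2.symm⟩, if_pos h0]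
      · rw [if_neg (by rintro ⟨hx, hy⟩; exact h0 ⟨hx.symm, hy.symm⟩), if_neg h0]
    | some i =>
      have hmem : (x, y) ∈ tails := by
        refine (PySem.List.index?_isSome_iff tails _).mp ?_
        rw [hidx]; rfl
      rw [if_pos hmem]
      simp

-- pvPut leaves an empty grid empty (the size ≤ 0 case)
theorem pvPut_nil (size : Int) (p : Int × Int) (m : String) :
    pvPut size [] p m = [] := by
  unfold pvPut
  split_ifs <;> simp

theorem fold_put_nil (size : Int) (l : List (Int × (Int × Int))) :
    l.foldl (fun g ip => pvPut size g ip.2 (PySem.Int.toStr (ip.1 + 1))) [] = [] := by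
  induction l with
  | nil => rfl
  | cons a l ih => simp [List.foldl_cons, pvPut_nil, ih]

-- A's result as a table of cellA
theorem A_eq_mg (head : Int × Int) (tails : List (Int × Int)) (size : Int) (hs : 0 ≤ size) :
    rope_map head tails size
      = mg (2*size).toNat
          (fun r c => cellA head tails (size - 1 - (r : Int)) ((c : Int) - size)) := by
  unfold rope_map
  have hstep : (fun (st : List (List String) × List String) (y : Int) =>
      (st.1 ++ [(PySem.List.pyRange (-size) size 1).foldl
        (fun line x =>
          if head = (x, y) then line ++ ["H"]
          else if (x, y) ∈ tails then
            line ++ [PySem.Int.toStr ((((PySem.List.index? tails (x, y)).getD 0 : Nat) : Int) + 1)]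
          else if x = 0 ∧ y = 0 then line ++ ["S"]
          else line ++ ["."]) st.2],
        ([] : List String)))
      = (fun (st : List (List String) × List String) (y : Int) =>
          (st.1 ++ [st.2 ++ (PySem.List.pyRange (-size) size 1).map (cellA head tails y)],
            ([] : List String))) := by
    funext st y
    simp only [innerA]
  rw [hstep, outer_generic]
  simp only [List.nil_append]
  have hrange : PySem.List.pyRange (-size) size 1
      = (List.range (2*size).toNat).map (fun k : Nat => -size + (k : Int)) := by
    rw [PySem.List.pyRange_one]
    have h2 : size - -size = 2*size := by ring
    rw [h2]
  rw [hrange]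
  apply List.ext_getElem
  · simp [mg]
  · intro r hrl hrr
    have hr : r < (2*size).toNat := by simpa [mg] using hrr
    rw [List.getElem_reverse]
    simp only [List.getElem_map, List.length_map, List.length_map, List.getElem_range,
      List.length_range, mg]
    apply List.ext_getElem
    · simp
    · intro c hcl hcr
      simp only [List.getElem_map, List.getElem_range]
      have hy : -size + (((2*size).toNat - 1 - r : Nat) : Int) = size - 1 - (r : Int) := by
        omega
      have hx : -size + (c : Int) = (c : Int) - size := by ring
      rw [hy, hx]

-- B's result as the same table
theorem B_eq_mg (head : Int × Int) (tails : List (Int × Int)) (size : Int) (hs : 0 ≤ size) :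
    rope_map_alt head tails size
      = mg (2*size).toNat
          (fun r c => cellA head tails (size - 1 - (r : Int)) ((c : Int) - size)) := by
  unfold rope_map_alt
  rw [blank_eq_mg, mg_put size hs, fold_tails size hs, mg_put size hs]
  refine mg_ext _ _ _ (fun r c hr hc => ?_)
  exact cell_agree head tails ((c : Int) - size) (size - 1 - (r : Int))

-- ===== VERDICT (by name: the statement is the Claim_ definition above) =====
theorem rope_map_spec : Claim_equal_rope_map := by
  intro head tails size _
  unfold Spec_rope_map
  by_cases hs : 0 ≤ size
  · rw [A_eq_mg head tails size hs, B_eq_mg head tails size hs]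
  · -- size < 0: A's range is empty and B's canvas is empty, both return []
    have hA : rope_map head tails size = [] := by
      unfold rope_map
      rw [PySem.List.pyRange_one_eq_nil (by omega)]
      simp
    have hB : rope_map_alt head tails size = [] := by
      unfold rope_map_alt
      have hN : (2*size).toNat = 0 := by omega
      rw [hN]
      simp only [List.replicate_zero]
      rw [pvPut_nil, fold_put_nil, pvPut_nil]
    rw [hA, hB]
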